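-- pv_equiv track=rewrite | github.com/FrAnKlInSousa/code_problems | src/code_problems/code_wars/best_travel.py | best_travel_variant
-- ===== SOURCE A (Python) =====
-- from itertools import combinations
-- from typing import List
--
-- def best_travel_variant(
--     maximum_distance: int, num_towns: int, distances: List[int]
-- ):
--     group_sum = combinations(distances, num_towns)
--     return max(
--         {sum(group) for group in group_sum if sum(group) <= maximum_distance},
--         default=None,
--     )
-- ===== SOURCE B (Python) =====
-- def best_travel_variant(maximum_distance, num_towns, distances):
--     if num_towns < 0:
--         return None
--     if num_towns > len(distances):
--         return None
--     k = num_towns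
--     # layers[c] = set of sums achievable by choosing exactly c of the distances seen so far
--     layers = [{0}] + [set() for _ in range(k)]
--     for x in distances:
--         new_layers = [layers[0]]
--         for c in range(1, k + 1):
--             new_layers.append(layers[c] | {s + x for s in layers[c - 1]})
--         layers = new_layers
--     candidates = [s for s in layers[k] if s <= maximum_distance]
--     return max(candidates) if candidates else None
-- ===== Notes on version B (the rewrite author's own statement) =====
-- stated objective: alternative
-- what changed: Replaces enumeration of all C(n,k) k-combinations with a layered subset-sum DP that keeps, for each count c<=k, the set of achievable sums, plus an early None when num_towns exceeds len(distances).
import Mathlib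
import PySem

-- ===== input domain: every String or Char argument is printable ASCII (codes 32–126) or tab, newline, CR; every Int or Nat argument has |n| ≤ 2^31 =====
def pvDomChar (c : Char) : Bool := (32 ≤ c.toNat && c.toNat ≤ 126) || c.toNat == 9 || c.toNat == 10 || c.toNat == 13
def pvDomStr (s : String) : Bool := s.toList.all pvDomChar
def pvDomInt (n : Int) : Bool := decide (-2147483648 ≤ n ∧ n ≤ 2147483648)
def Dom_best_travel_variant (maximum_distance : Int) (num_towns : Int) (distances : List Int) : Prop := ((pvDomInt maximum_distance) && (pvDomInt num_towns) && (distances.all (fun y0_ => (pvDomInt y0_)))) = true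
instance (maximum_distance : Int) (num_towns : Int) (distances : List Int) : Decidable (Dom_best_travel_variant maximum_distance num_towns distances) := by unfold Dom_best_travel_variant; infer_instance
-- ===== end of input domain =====

-- B replaces the enumeration of all C(n,k) combinations by a layered subset-sum DP
-- (sets of achievable sums per chosen count); return values are proved equal under Pre_.

-- ===== PORT A =====
-- max({sum(g) for g in combinations(distances, num_towns) if sum(g) <= maximum_distance}, default=None)
def best_travel_variant (maximum_distance : Int) (num_towns : Int) (distances : List Int) : Option Int :=
  PySem.List.max?
    (PySem.Set.ofList
      (((PySem.List.combinations distances num_towns.toNat).map List.sum).filter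
        (fun s => decide (s ≤ maximum_distance))))
    (fun y => y)

-- ===== PORT B =====
-- inner loop: for c in range(1, k+1): new_layers.append(layers[c] | {s + x for s in layers[c-1]})
def altRow (x : Int) (prev : PySem.Set Int) : List (PySem.Set Int) → List (PySem.Set Int)
  | [] => []
  | c :: cs => PySem.Set.union c (prev.map (· + x)) :: altRow x c cs

-- one pass of the outer loop body: new_layers = [layers[0]] ++ …
def altStep (x : Int) : List (PySem.Set Int) → List (PySem.Set Int)
  | [] => []
  | l0 :: rest => l0 :: altRow x l0 rest

def best_travel_variant_alt (maximum_distance : Int) (num_towns : Int) (distances : List Int) : Option Int :=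
  if num_towns < 0 then none
  else if (distances.length : Int) < num_towns then none
  else
    PySem.List.max?
      ((PySem.List.pyGetD
          (distances.foldl (fun ls x => altStep x ls)
            (PySem.Set.ofList [0] :: List.replicate num_towns.toNat PySem.Set.empty))
          num_towns []).filter (fun s => decide (s ≤ maximum_distance)))
      (fun y => y)

-- ===== PRECONDITION & SPEC =====
-- Pre_ excludes only num_towns < 0, where Python's combinations(distances, num_towns) raises ValueError.
def Pre_best_travel_variant (maximum_distance : Int) (num_towns : Int) (distances : List Int) : Prop :=
  0 ≤ num_towns
instance (maximum_distance : Int) (num_towns : Int) (distances : List Int) : Decidable (Pre_best_travel_variant maximum_distance num_towns distances) := by unfold Pre_best_travel_variant; infer_instance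

def pvWitness_best_travel_variant : Int × Int × List Int := (10, 2, [1, 2, 3])

def Spec_best_travel_variant (maximum_distance : Int) (num_towns : Int) (distances : List Int) (out : Option Int) : Prop := out = best_travel_variant_alt maximum_distance num_towns distances
instance (maximum_distance : Int) (num_towns : Int) (distances : List Int) (out : Option Int) : Decidable (Spec_best_travel_variant maximum_distance num_towns distances out) := by unfold Spec_best_travel_variant; infer_instance

-- ===== CLAIM (what is proved, stated in full; the proofs are below) =====
def Claim_equal_best_travel_variant : Prop := ∀ (maximum_distance : Int) (num_towns : Int) (distances : List Int), Dom_best_travel_variant maximum_distance num_towns distances → Pre_best_travel_variant maximum_distance num_towns distances → Spec_best_travel_variant maximum_distance num_towns distances (best_travel_variant maximum_distance num_towns distances)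


-- ===== LEMMAS AND PROOFS =====

theorem length_altRow (x : Int) (prev : PySem.Set Int) (ls : List (PySem.Set Int)) :
    (altRow x prev ls).length = ls.length := by
  induction ls generalizing prev with
  | nil => rfl
  | cons c cs ih => simp [altRow, ih]

theorem length_altStep (x : Int) (ls : List (PySem.Set Int)) :
    (altStep x ls).length = ls.length := by
  cases ls with
  | nil => rfl
  | cons l0 rest => simp [altStep, length_altRow]

theorem length_fold (ds : List Int) (layers : List (PySem.Set Int)) :
    (ds.foldl (fun ls x => altStep x ls) layers).length = layers.length := by
  induction ds generalizing layers with
  | nil => rfl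
  | cons y rest ih => simp [List.foldl, ih, length_altStep]

theorem mem_altRow_getD (x : Int) (prev : PySem.Set Int) (ls : List (PySem.Set Int))
    (i : Nat) (hi : i < ls.length) (z : Int) :
    z ∈ (altRow x prev ls).getD i [] ↔
      z ∈ ls.getD i [] ∨ ∃ s ∈ (prev :: ls).getD i [], z = s + x := by
  induction ls generalizing prev i with
  | nil => simp at hi
  | cons c cs ih =>
    cases i with
    | zero => simp [altRow, PySem.Set.mem_union, eq_comm]
    | succ j => simpa [altRow] using ih c j (by simpa using hi)

theorem mem_altStep_getD (x : Int) (layers : List (PySem.Set Int)) (i : Nat)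
    (hi : i < layers.length) (z : Int) :
    z ∈ (altStep x layers).getD i [] ↔
      z ∈ layers.getD i [] ∨ (0 < i ∧ ∃ s ∈ layers.getD (i - 1) [], z = s + x) := by
  cases layers with
  | nil => simp at hi
  | cons l0 rest =>
    cases i with
    | zero => simp [altStep]
    | succ j => simpa [altStep] using mem_altRow_getD x l0 rest j (by simpa using hi) z

theorem mem_fold (ds : List Int) :
    ∀ (layers : List (PySem.Set Int)) (c : Nat), c < layers.length → ∀ (z : Int),
      z ∈ (ds.foldl (fun ls x => altStep x ls) layers).getD c [] ↔
        ∃ combo : List Int, combo.Sublist ds ∧ combo.length ≤ c ∧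
          ∃ s ∈ layers.getD (c - combo.length) [], z = s + combo.sum := by
  induction ds with
  | nil =>
    intro layers c _ z
    constructor
    · intro h; exact ⟨[], List.Sublist.refl _, by simp, z, by simpa using h, by simp⟩
    · rintro ⟨combo, hsub, -, s, hs, rfl⟩
      have : combo = [] := List.sublist_nil.mp hsub
      subst this; simpa using hs
  | cons y rest ih =>
    intro layers c hc z
    rw [List.foldl_cons, ih (altStep y layers) c (by rwa [length_altStep]) z]
    have hstep : ∀ (i : Nat), i ≤ c → ∀ (s : Int),
        s ∈ (altStep y layers).getD i [] ↔
          s ∈ layers.getD i [] ∨ (0 < i ∧ ∃ t ∈ layers.getD (i - 1) [], s = t + y) :=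
      fun i hi s => mem_altStep_getD y layers i (by omega) s
    constructor
    · rintro ⟨combo, hsub, hlen, s, hs, rfl⟩
      rcases (hstep (c - combo.length) (by omega) s).mp hs with h | ⟨hpos, t, ht, rfl⟩
      · exact ⟨combo, hsub.cons y, hlen, s, h, rfl⟩
      · refine ⟨y :: combo, List.cons_sublist_cons.mpr hsub,
          by simp only [List.length_cons]; omega, t, ?_, by simp only [List.sum_cons]; ring⟩
        have : c - (y :: combo).length = c - combo.length - 1 := by
          simp only [List.length_cons]; omega
        rw [this]; exact ht
    · rintro ⟨combo, hsub, hlen, s, hs, rfl⟩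
      rcases List.sublist_cons_iff.mp hsub with h | ⟨tl, rfl, htl⟩
      · exact ⟨combo, h, hlen, s,
          (hstep (c - combo.length) (by omega) s).mpr (Or.inl hs), rfl⟩
      · have hlen' : tl.length + 1 ≤ c := by simpa using hlen
        refine ⟨tl, htl, by omega, s + y, ?_, by simp only [List.sum_cons]; ring⟩
        refine (hstep (c - tl.length) (by omega) (s + y)).mpr
          (Or.inr ⟨by omega, s, ?_, rfl⟩)
        have : c - tl.length - 1 = c - (y :: tl).length := by
          simp only [List.length_cons]; omega
        rw [this]; exact hs

theorem max?_congr_mem (xs ys : List Int) (h : ∀ z : Int, z ∈ xs ↔ z ∈ ys) :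
    PySem.List.max? xs (fun y => y) = PySem.List.max? ys (fun y => y) := by
  cases hx : PySem.List.max? xs (fun y => y) with
  | none =>
    have hxe : xs = [] := (PySem.List.max?_eq_none_iff xs _).mp hx
    cases hy : PySem.List.max? ys (fun y => y) with
    | none => rfl
    | some w =>
      have : w ∈ ys := PySem.List.max?_mem hy
      rw [← h w, hxe] at this; cases this
  | some v =>
    have hvx : v ∈ xs := PySem.List.max?_mem hx
    cases hy : PySem.List.max? ys (fun y => y) with
    | none =>
      have hye : ys = [] := (PySem.List.max?_eq_none_iff ys _).mp hy
      rw [h v, hye] at hvx; cases hvx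
    | some w =>
      have hwy : w ∈ ys := PySem.List.max?_mem hy
      have h1 : v ≤ w := PySem.List.max?_isMax hy v ((h v).mp hvx)
      have h2 : w ≤ v := PySem.List.max?_isMax hx w ((h w).mpr hwy)
      exact congrArg some (le_antisymm h1 h2)

theorem mem_layers0 (n i : Nat) (s : Int) :
    s ∈ (PySem.Set.ofList [(0 : Int)] :: List.replicate n PySem.Set.empty).getD i [] ↔
      i = 0 ∧ s = 0 := by
  cases i with
  | zero => simp [PySem.Set.ofList, PySem.Set.add]
  | succ j => simp

-- ===== VERDICT (by name: the statement is the Claim_ definition above) =====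
theorem best_travel_variant_spec : Claim_equal_best_travel_variant := by
  intro m k d _ hpre
  have hk0 : (0 : Int) ≤ k := hpre
  unfold Spec_best_travel_variant best_travel_variant best_travel_variant_alt
  have hk : ¬ k < 0 := not_lt.mpr hk0
  rw [if_neg hk]
  by_cases hbig : (d.length : Int) < k
  · rw [if_pos hbig]
    have : PySem.List.combinations d k.toNat = [] :=
      PySem.List.combinations_eq_nil_of_length_lt d (by omega)
    simp [this, PySem.Set.ofList]
  · rw [if_neg hbig]
    have hlen : (d.foldl (fun ls x => altStep x ls)
        (PySem.Set.ofList [(0:Int)] :: List.replicate k.toNat PySem.Set.empty)).length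
        = k.toNat + 1 := by
      rw [length_fold]; simp
    have hget : PySem.List.pyGetD (d.foldl (fun ls x => altStep x ls)
        (PySem.Set.ofList [(0:Int)] :: List.replicate k.toNat PySem.Set.empty)) k []
        = (d.foldl (fun ls x => altStep x ls)
        (PySem.Set.ofList [(0:Int)] :: List.replicate k.toNat PySem.Set.empty)).getD k.toNat [] := by
      rw [PySem.List.pyGetD_eq_getElem _ _ hk0 (by rw [hlen]; omega)]
      rw [List.getD_eq_getElem _ _ (by rw [hlen]; omega)]
    rw [hget]
    apply max?_congr_mem
    intro z
    rw [PySem.Set.mem_ofList, List.mem_filter, List.mem_filter, List.mem_map,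
      mem_fold d _ k.toNat (by simp) z]
    constructor
    · rintro ⟨⟨g, hg, rfl⟩, hle⟩
      rw [PySem.List.mem_combinations_iff] at hg
      exact ⟨⟨g, hg.1, by omega, 0, (mem_layers0 _ _ _).mpr ⟨by omega, rfl⟩, by ring⟩, hle⟩
    · rintro ⟨⟨combo, hsub, hclen, s, hs, rfl⟩, hle⟩
      rcases (mem_layers0 _ _ _).mp hs with ⟨hz, rfl⟩
      refine ⟨⟨combo, ?_, by ring⟩, hle⟩
      rw [PySem.List.mem_combinations_iff]
      exact ⟨hsub, by omega⟩
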